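-- pv_equiv track=rewrite | github.com/AldyDPP/Tucil1_13522022 | solver/solver.py | solve
-- ===== SOURCE A (Python) =====
-- def generatePath(matrix, i, j, buffer : int, path : list[str], vertical : bool, result) -> None :
--
--     result.append(path.copy())
--     if buffer == 0 :
--         return
--
--     else :
--
--         if vertical :
--             for newi in range(len(matrix)) :
--                 if (newi,j) not in path :
--                     path.append((newi,j))
--                     generatePath(matrix, newi, j, buffer-1, path, not(vertical), result)
--                     path.pop()
--
--         else :
--             for newj in range(len(matrix[0])) :
--                 if (i,newj) not in path :
--                     path.append((i,newj))
--                     generatePath(matrix, i, newj, buffer-1, path, not(vertical), result)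
--                     path.pop()
--
-- def generateAllPaths(matrix : list[list[str]], buffer : int) -> list[list[str]] :
--     result = list()
--     for j in range(len(matrix[0])) :
--         path = [(0,j)]
--         generatePath(matrix, i=0, j=j, buffer=buffer-1, path=path, vertical=True, result = result)
--
--     return result
--
-- def pathToString(matrix, path : list[tuple]) -> list[str] :
--     return "".join([matrix[i][j] for (i,j) in path])
--
-- def pathValue(path_str : str, sequenceValues : list[int], sequences : list[str]) :
--
--     ans = 0
--     for seq,val in zip(sequences, sequenceValues) :
--         idx = path_str.find(seq)
--         if idx > -1 and idx % 2 == 0 :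
--             ans += val
--     return ans
--
-- def solve(matrix, buffer, sequences, sequenceValues) :
--
--     # Generate all possible paths
--     paths = generateAllPaths(matrix, buffer)
--
--     # Convert all paths to token strings, store in second array
--     path_strs = [pathToString(matrix, path) for path in paths]
--     ans,ansidx = 0,0
--
--     # Each path is evaluated. Find the index of the max/best path as well as its value
--     for idx,path in enumerate(path_strs) :
--         v = pathValue(path, sequenceValues, sequences)
--         if v > ans :
--             ans = v
--             ansidx = idx
--         elif v == ans and len(path_strs[idx]) < len(path_strs[ansidx]) :
--             ansidx = idx
--
--     bestpathstr = path_strs[ansidx]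
--     bestpathstr = " ".join([bestpathstr[i:i+2] for i in range(0, len(bestpathstr), 2)])
--     bestpath = paths[ansidx]
--
--     return ans,bestpathstr,bestpath
-- ===== SOURCE B (Python) =====
-- def solve(matrix, buffer, sequences, sequenceValues):
--     # Single-pass DFS: evaluates each path as it is generated (string built
--     # incrementally) and keeps the running best, instead of materializing the
--     # whole path list and re-scanning it.
--     rows, cols = len(matrix), len(matrix[0])
--     pairs = list(zip(sequences, sequenceValues))
--
--     def value(s):
--         total = 0
--         for seq, val in pairs:
--             i = s.find(seq)
--             if i > -1 and i % 2 == 0: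
--                 total += val
--         return total
--
--     best_val, best_str, best_path = 0, matrix[0][0], [(0, 0)]
--
--     def visit(i, j, b, s, path, vertical):
--         nonlocal best_val, best_str, best_path
--         v = value(s)
--         if v > best_val or (v == best_val and len(s) < len(best_str)):
--             best_val, best_str, best_path = v, s, path
--         if b == 0:
--             return
--         if vertical:
--             for ni in range(rows):
--                 if (ni, j) not in path:
--                     visit(ni, j, b - 1, s + matrix[ni][j], path + [(ni, j)], False)
--         else:
--             for nj in range(cols):
--                 if (i, nj) not in path:
--                     visit(i, nj, b - 1, s + matrix[i][nj], path + [(i, nj)], True)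
--
--     for j in range(cols):
--         visit(0, j, buffer - 1, matrix[0][j], [(0, j)], True)
--
--     fmt = " ".join(best_str[k:k + 2] for k in range(0, len(best_str), 2))
--     return best_val, fmt, best_path
-- ===== Notes on version B (the rewrite author's own statement) =====
-- stated objective: alternative
-- what changed: A materializes the full list of all paths, maps it to strings, and then re-scans with an index-based selection loop; B is a single-pass DFS that builds each path's token string incrementally and keeps only the running best triple, never storing the path list.
import Mathlib
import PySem

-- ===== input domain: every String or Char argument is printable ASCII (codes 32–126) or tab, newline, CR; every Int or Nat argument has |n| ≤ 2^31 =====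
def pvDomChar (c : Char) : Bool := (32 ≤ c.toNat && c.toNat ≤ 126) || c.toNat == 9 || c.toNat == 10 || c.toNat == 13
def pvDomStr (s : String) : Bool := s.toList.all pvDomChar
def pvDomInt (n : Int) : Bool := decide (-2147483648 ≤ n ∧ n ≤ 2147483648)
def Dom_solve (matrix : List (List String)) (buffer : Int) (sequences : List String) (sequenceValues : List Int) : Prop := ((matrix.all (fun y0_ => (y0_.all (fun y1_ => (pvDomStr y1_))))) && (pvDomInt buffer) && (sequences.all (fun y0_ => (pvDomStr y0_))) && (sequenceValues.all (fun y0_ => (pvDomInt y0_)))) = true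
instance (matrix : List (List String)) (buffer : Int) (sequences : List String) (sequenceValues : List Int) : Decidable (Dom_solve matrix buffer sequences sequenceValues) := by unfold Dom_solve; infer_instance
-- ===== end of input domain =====

-- B replaces A's generate-all-paths-then-rescan pipeline by a single-pass DFS that scores each
-- path as it is generated and keeps only the running best (objective: alternative decomposition,
-- avoids materializing the whole path list).

-- ===== PORT A =====

-- matrix[i][j]; indices produced by the algorithm are nonnegative and (under Pre_solve) in range,
-- so the defaults of getD are never taken on admitted inputs
def pvCell (matrix : List (List String)) (i j : Int) : String :=
  (PySem.List.pyGet? ((PySem.List.pyGet? matrix i).getD []) j).getD ""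

-- generatePath: the mutated `result`/`path` become the returned list / an extended argument.
-- `fuel` only makes the recursion structural: each call appends a fresh grid cell to `path`,
-- so with the initial fuel rows*cols+1 the fuel never runs out before the Python returns.
def gpA (fuel : Nat) (matrix : List (List String)) (i j : Int) (buffer : Int)
    (path : List (Int × Int)) (vertical : Bool) : List (List (Int × Int)) :=
  path :: (match fuel with
  | 0 => []
  | fuel + 1 =>
    if buffer == 0 then []
    else if vertical then
      (List.range matrix.length).foldl (fun acc (newi : Nat) =>
        if path.contains ((newi : Int), j) then acc
        else acc ++ gpA fuel matrix newi j (buffer - 1) (path ++ [((newi : Int), j)]) false) []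
    else
      (List.range (matrix.headD []).length).foldl (fun acc (newj : Nat) =>
        if path.contains (i, (newj : Int)) then acc
        else acc ++ gpA fuel matrix i newj (buffer - 1) (path ++ [(i, (newj : Int))]) true) [])

-- generateAllPaths
def pathsA (matrix : List (List String)) (buffer : Int) : List (List (Int × Int)) :=
  (List.range (matrix.headD []).length).foldl (fun acc (j : Nat) =>
    acc ++ gpA (matrix.length * (matrix.headD []).length + 1) matrix 0 (j : Int) (buffer - 1)
      [((0 : Int), (j : Int))] true) []

-- pathToString
def ptsA (matrix : List (List String)) (path : List (Int × Int)) : String :=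
  PySem.Str.join "" (path.map (fun p => pvCell matrix p.1 p.2))

-- pathValue
def pvalA (path_str : String) (sequenceValues : List Int) (sequences : List String) : Int :=
  (sequences.zip sequenceValues).foldl (fun ans qv =>
    let idx := PySem.Str.find path_str qv.1
    if -1 < idx ∧ PySem.Int.mod idx 2 = 0 then ans + qv.2 else ans) 0

-- " ".join([s[i:i+2] for i in range(0, len(s), 2)]) — the identical line occurs in both Pythons
def pvFmt (s : String) : String :=
  PySem.Str.join " " ((PySem.List.pyRange 0 (PySem.Str.len s) 2).map
    (fun k => PySem.Str.slice s (some k) (some (k + 2))))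

def solve (matrix : List (List String)) (buffer : Int) (sequences : List String) (sequenceValues : List Int) : Int × String × (List (Int × Int)) :=
  let paths := pathsA matrix buffer
  let path_strs := paths.map (ptsA matrix)
  let r := (PySem.List.enumerate path_strs 0).foldl (fun (st : Int × Int) p =>
    let v := pvalA p.2 sequenceValues sequences
    if v > st.1 then (v, p.1)
    else if v = st.1 ∧ PySem.Str.len (PySem.List.pyGetD path_strs p.1 "") <
        PySem.Str.len (PySem.List.pyGetD path_strs st.2 "") then (st.1, p.1)
    else st) ((0 : Int), (0 : Int))
  let bestpathstr := PySem.List.pyGetD path_strs r.2 ""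
  (r.1, pvFmt bestpathstr, PySem.List.pyGetD paths r.2 [])

-- ===== PORT B =====

-- value(s) over the pre-zipped pairs
def pvalB (pairs : List (String × Int)) (s : String) : Int :=
  pairs.foldl (fun total qv =>
    let i := PySem.Str.find s qv.1
    if -1 < i ∧ PySem.Int.mod i 2 = 0 then total + qv.2 else total) 0

-- the best-update lines of visit()
def stepB (pairs : List (String × Int)) (s : String) (path : List (Int × Int))
    (best : Int × String × List (Int × Int)) : Int × String × List (Int × Int) :=
  let v := pvalB pairs s
  if v > best.1 ∨ (v = best.1 ∧ PySem.Str.len s < PySem.Str.len best.2.1) then (v, s, path) else best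

-- visit(): DFS threading the running best; `s` is the token string of `path`, built incrementally.
-- fuel as in gpA: rows*cols+1 is never exhausted since every call adds a fresh grid cell.
def dfsB (fuel : Nat) (matrix : List (List String)) (rows cols : Nat) (pairs : List (String × Int))
    (i j b : Int) (s : String) (path : List (Int × Int)) (vertical : Bool)
    (best : Int × String × List (Int × Int)) : Int × String × List (Int × Int) :=
  let best := stepB pairs s path best
  match fuel with
  | 0 => best
  | fuel + 1 =>
    if b == 0 then best
    else if vertical then
      (List.range rows).foldl (fun bst (ni : Nat) =>
        if path.contains ((ni : Int), j) then bst
        else dfsB fuel matrix rows cols pairs ni j (b - 1) (s ++ pvCell matrix ni j)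
          (path ++ [((ni : Int), j)]) false bst) best
    else
      (List.range cols).foldl (fun bst (nj : Nat) =>
        if path.contains (i, (nj : Int)) then bst
        else dfsB fuel matrix rows cols pairs i nj (b - 1) (s ++ pvCell matrix i nj)
          (path ++ [(i, (nj : Int))]) true bst) best

def solve_alt (matrix : List (List String)) (buffer : Int) (sequences : List String) (sequenceValues : List Int) : Int × String × (List (Int × Int)) :=
  let rows := matrix.length
  let cols := (matrix.headD []).length
  let pairs := sequences.zip sequenceValues
  let best := (List.range cols).foldl (fun bst (j : Nat) =>
      dfsB (rows * cols + 1) matrix rows cols pairs 0 (j : Int) (buffer - 1)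
        (pvCell matrix 0 (j : Int)) [((0 : Int), (j : Int))] true bst)
    ((0 : Int), pvCell matrix 0 0, [((0 : Int), (0 : Int))])
  (best.1, pvFmt best.2.1, best.2.2)

-- ===== PRECONDITION & SPEC =====
-- Pre_solve excludes exactly the inputs where the Python A raises IndexError: an empty matrix or an
-- empty first row (matrix[0] / path_strs[0] out of range), and — only when some row other than row 0
-- is actually visited, i.e. rows ≥ 2 and buffer ≠ 1 — a later row shorter than row 0 (matrix[i][j]
-- out of range in pathToString).
def Pre_solve (matrix : List (List String)) (buffer : Int) (sequences : List String) (sequenceValues : List Int) : Prop :=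
  matrix ≠ [] ∧ 1 ≤ (matrix.headD []).length ∧
  ((2 ≤ matrix.length ∧ buffer ≠ 1) → ∀ row ∈ matrix, (matrix.headD []).length ≤ row.length)
instance (matrix : List (List String)) (buffer : Int) (sequences : List String) (sequenceValues : List Int) : Decidable (Pre_solve matrix buffer sequences sequenceValues) := by unfold Pre_solve; infer_instance

def pvWitness_solve : List (List String) × Int × List String × List Int :=
  ([["A", "B"], ["C", "D"]], 3, ["AB"], [5])

def Spec_solve (matrix : List (List String)) (buffer : Int) (sequences : List String) (sequenceValues : List Int) (out : Int × String × (List (Int × Int))) : Prop := out = solve_alt matrix buffer sequences sequenceValues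
instance (matrix : List (List String)) (buffer : Int) (sequences : List String) (sequenceValues : List Int) (out : Int × String × (List (Int × Int))) : Decidable (Spec_solve matrix buffer sequences sequenceValues out) := by unfold Spec_solve; infer_instance

-- ===== CLAIM (what is proved, stated in full; the proofs are below) =====
def Claim_equal_solve : Prop := ∀ (matrix : List (List String)) (buffer : Int) (sequences : List String) (sequenceValues : List Int), Dom_solve matrix buffer sequences sequenceValues → Pre_solve matrix buffer sequences sequenceValues → Spec_solve matrix buffer sequences sequenceValues (solve matrix buffer sequences sequenceValues)

-- ===== LEMMAS AND PROOFS =====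

theorem pvWitness_ok : Dom_solve (pvWitness_solve.1) (pvWitness_solve.2.1) (pvWitness_solve.2.2.1) (pvWitness_solve.2.2.2) ∧ Pre_solve (pvWitness_solve.1) (pvWitness_solve.2.1) (pvWitness_solve.2.2.1) (pvWitness_solve.2.2.2) := by
  constructor <;> decide

theorem join_empty_cons (h : String) (t : List String) :
    PySem.Str.join "" (h :: t) = h ++ PySem.Str.join "" t := by
  cases t with
  | nil => simp [PySem.Str.join, PySem.Chars.join, List.intercalate]
  | cons a r =>
      simp only [PySem.Str.join, List.map_cons]
      rw [PySem.Chars.join_cons_cons]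
      simp [String.ofList_append]

theorem pts_nil (matrix : List (List String)) : ptsA matrix [] = "" := by
  simp [ptsA, PySem.Str.join, PySem.Chars.join]
  decide

theorem pts_cons (matrix : List (List String)) (c : Int × Int) (path : List (Int × Int)) :
    ptsA matrix (c :: path) = pvCell matrix c.1 c.2 ++ ptsA matrix path := by
  simp [ptsA, List.map_cons, join_empty_cons]

theorem pts_append (matrix : List (List String)) (path : List (Int × Int)) (a b : Int) :
    ptsA matrix (path ++ [(a, b)]) = ptsA matrix path ++ pvCell matrix a b := by
  induction path with
  | nil => simp [pts_cons, pts_nil]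
  | cons h t ih => simp [pts_cons, ih, String.append_assoc]

theorem pts_singleton (matrix : List (List String)) (a b : Int) :
    ptsA matrix [(a, b)] = pvCell matrix a b := by
  simp [pts_cons, pts_nil]

theorem pval_eq (s : String) (vals : List Int) (seqs : List String) :
    pvalA s vals seqs = pvalB (seqs.zip vals) s := rfl

-- generic fold shape: folding a step function over a list built by acc-appending pieces
-- equals threading the step through the pieces directly
theorem foldl_build_eq {α γ δ : Type} (f : δ → γ → δ) (c : α → Bool) (g : α → List γ) :
    ∀ (L : List α) (acc : List γ) (b : δ),
    (L.foldl (fun a k => if c k then a else a ++ g k) acc).foldl f b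
      = L.foldl (fun d k => if c k then d else (g k).foldl f d) (acc.foldl f b) := by
  intro L
  induction L with
  | nil => intro acc b; rfl
  | cons k rest ih =>
      intro acc b
      by_cases h : c k = true
      · simp only [List.foldl_cons, h, if_true, ih]
      · simp only [List.foldl_cons, eq_false_of_ne_true h, Bool.false_eq_true, if_false, ih,
          List.foldl_append]

-- the DFS of B equals folding the best-update over the path list A generates
theorem dfs_eq (matrix : List (List String)) (pairs : List (String × Int)) :
    ∀ (fuel : Nat) (i j b : Int) (path : List (Int × Int)) (vertical : Bool)
      (best : Int × String × List (Int × Int)),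
    dfsB fuel matrix matrix.length (matrix.headD []).length pairs i j b
        (ptsA matrix path) path vertical best
      = (gpA fuel matrix i j b path vertical).foldl
          (fun bst q => stepB pairs (ptsA matrix q) q bst) best := by
  intro fuel
  induction fuel with
  | zero => intro i j b path vertical best; rfl
  | succ fuel ih =>
      intro i j b path vertical best
      show dfsB (fuel + 1) _ _ _ _ _ _ _ _ _ _ _ = _
      rw [dfsB, gpA]
      by_cases hb : (b == 0) = true
      · simp only [hb, if_true, List.foldl_cons, List.foldl_nil]
      · simp only [eq_false_of_ne_true hb, Bool.false_eq_true, if_false, List.foldl_cons]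
        cases vertical with
        | true =>
            simp only [if_true]
            rw [foldl_build_eq]
            simp only [List.foldl_nil]
            congr 1
            funext bst ni
            by_cases hc : path.contains ((ni : Int), j) = true
            · have hm : ((ni : Int), j) ∈ path := by simpa using hc
              simp [hm]
            · have hm : ¬ ((ni : Int), j) ∈ path := by simpa using hc
              rw [if_neg hc, if_neg hc, ← pts_append, ih]
        | false =>
            simp only [Bool.false_eq_true, if_false]
            rw [foldl_build_eq]
            simp only [List.foldl_nil]
            congr 1
            funext bst nj
            by_cases hc : path.contains (i, (nj : Int)) = true
            · have hm : (i, (nj : Int)) ∈ path := by simpa using hc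
              simp [hm]
            · have hm : ¬ (i, (nj : Int)) ∈ path := by simpa using hc
              rw [if_neg hc, if_neg hc, ← pts_append, ih]

-- A's index-based selection loop, started at position k of the full list, equals folding the
-- triple-update stepB over the remaining paths
theorem sel_eq (matrix : List (List String)) (vals : List Int) (seqs : List String)
    (all : List (List (Int × Int))) :
    ∀ (suf : List (List (Int × Int))) (k : Nat) (st : Int × Int),
    all.drop k = suf → 0 ≤ st.2 → st.2 < all.length →
    (fun (r : Int × Int) =>
      ((r.1, PySem.List.pyGetD (all.map (ptsA matrix)) r.2 "",
        PySem.List.pyGetD all r.2 []) : Int × String × List (Int × Int)))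
      ((PySem.List.enumerate (suf.map (ptsA matrix)) (k : Int)).foldl
        (fun (st : Int × Int) p =>
          let v := pvalA p.2 vals seqs
          if v > st.1 then (v, p.1)
          else if v = st.1 ∧ PySem.Str.len (PySem.List.pyGetD (all.map (ptsA matrix)) p.1 "") <
              PySem.Str.len (PySem.List.pyGetD (all.map (ptsA matrix)) st.2 "") then (st.1, p.1)
          else st) st)
      = suf.foldl (fun bst q => stepB (seqs.zip vals) (ptsA matrix q) q bst)
          (st.1, PySem.List.pyGetD (all.map (ptsA matrix)) st.2 "",
           PySem.List.pyGetD all st.2 []) := by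
  intro suf
  induction suf with
  | nil => intro k st _ _ _; rfl
  | cons q rest ih =>
      intro k st hdrop h0 h1
      have hk : k < all.length := by
        by_contra hge
        rw [List.drop_eq_nil_of_le (by omega)] at hdrop
        simp at hdrop
      have hcons : all.drop k = all[k] :: all.drop (k + 1) := List.drop_eq_getElem_cons hk
      rw [hdrop] at hcons
      injection hcons with hq hrest
      have hq' : all[k] = q := hq.symm
      have hrest' : all.drop (k + 1) = rest := hrest.symm
      have hgetP : PySem.List.pyGetD all (k : Int) [] = q := by
        rw [PySem.List.pyGetD_natCast, List.getD_eq_getElem?_getD, List.getElem?_eq_getElem hk,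
          Option.getD_some, hq']
      have hkm : k < (all.map (ptsA matrix)).length := by simpa using hk
      have hgetS : PySem.List.pyGetD (all.map (ptsA matrix)) (k : Int) "" = ptsA matrix q := by
        rw [PySem.List.pyGetD_natCast, List.getD_eq_getElem?_getD, List.getElem?_eq_getElem hkm,
          Option.getD_some, List.getElem_map, hq']
      rw [List.map_cons, PySem.List.enumerate_cons, List.foldl_cons]
      have hpush : ((k : Int) + 1) = ((k + 1 : Nat) : Int) := by push_cast; ring
      rw [hpush]
      set v := pvalA (ptsA matrix q) vals seqs with hv
      have hb0 : (0 : Int) ≤ (k : Int) := by positivity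
      have hb1 : ((k : Int)) < ((all.length : Int)) := by exact_mod_cast hk
      by_cases hgt : v > st.1
      · rw [if_pos hgt]
        rw [ih (k + 1) ((v, (k : Int)) : Int × Int) hrest' hb0 hb1]
        have hstep : stepB (seqs.zip vals) (ptsA matrix q) q
            (st.1, PySem.List.pyGetD (all.map (ptsA matrix)) st.2 "",
             PySem.List.pyGetD all st.2 []) = (v, ptsA matrix q, q) := by
          simp only [stepB, ← pval_eq, ← hv]
          rw [if_pos (Or.inl hgt)]
        rw [List.foldl_cons, hstep]
        congr 1
        simp [hgetP, hgetS]
      · rw [if_neg hgt]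
        by_cases htie : v = st.1 ∧ PySem.Str.len (PySem.List.pyGetD (all.map (ptsA matrix)) (k : Int) "") <
            PySem.Str.len (PySem.List.pyGetD (all.map (ptsA matrix)) st.2 "")
        · rw [if_pos htie]
          rw [ih (k + 1) ((st.1, (k : Int)) : Int × Int) hrest' hb0 hb1]
          have hlen : PySem.Str.len (ptsA matrix q) <
              PySem.Str.len (PySem.List.pyGetD (all.map (ptsA matrix)) st.2 "") := by
            rw [← hgetS]; exact htie.2
          have hstep : stepB (seqs.zip vals) (ptsA matrix q) q
              (st.1, PySem.List.pyGetD (all.map (ptsA matrix)) st.2 "",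
               PySem.List.pyGetD all st.2 []) = (v, ptsA matrix q, q) := by
            simp only [stepB, ← pval_eq, ← hv]
            rw [if_pos (Or.inr ⟨htie.1, hlen⟩)]
          rw [List.foldl_cons, hstep]
          congr 1
          simp [hgetP, hgetS, htie.1]
        · rw [if_neg htie]
          rw [ih (k + 1) st hrest' h0 h1]
          have hstep : stepB (seqs.zip vals) (ptsA matrix q) q
              (st.1, PySem.List.pyGetD (all.map (ptsA matrix)) st.2 "",
               PySem.List.pyGetD all st.2 []) =
              (st.1, PySem.List.pyGetD (all.map (ptsA matrix)) st.2 "",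
               PySem.List.pyGetD all st.2 []) := by
            simp only [stepB, ← pval_eq, ← hv]
            rw [if_neg]
            intro hor
            rcases hor with h | h
            · exact hgt h
            · exact htie ⟨h.1, by rw [hgetS]; exact h.2⟩
          rw [List.foldl_cons, hstep]

theorem gpA_head (fuel : Nat) (m : List (List String)) (i j b : Int)
    (path : List (Int × Int)) (vert : Bool) :
    ∃ t, gpA fuel m i j b path vert = path :: t := by
  cases fuel <;> exact ⟨_, rfl⟩

theorem solve_eq_solve_alt (matrix : List (List String)) (buffer : Int)
    (sequences : List String) (sequenceValues : List Int)
    (hcols : 1 ≤ (matrix.headD []).length) :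
    solve matrix buffer sequences sequenceValues = solve_alt matrix buffer sequences sequenceValues := by
  have hpaths : pathsA matrix buffer
      = (List.range ((matrix.headD []).length)).flatMap
          (fun (j : Nat) => gpA (matrix.length * (matrix.headD []).length + 1) matrix 0 (j : Int)
            (buffer - 1) [((0 : Int), (j : Int))] true) := by
    unfold pathsA
    rw [PySem.List.foldl_append_eq_flatMap]
    exact List.nil_append _
  obtain ⟨c, hc⟩ : ∃ c, (matrix.headD []).length = c + 1 :=
    ⟨_, (Nat.succ_pred_eq_of_pos hcols).symm⟩
  have hne : ∃ t, pathsA matrix buffer = [((0 : Int), (0 : Int))] :: t := by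
    rw [hpaths, hc, List.range_succ_eq_map, List.flatMap_cons]
    simp only [Nat.cast_zero]
    obtain ⟨t, ht⟩ := gpA_head (matrix.length * (c + 1) + 1) matrix 0 0
      (buffer - 1) [((0 : Int), (0 : Int))] true
    rw [ht]
    exact ⟨_, rfl⟩
  obtain ⟨tl, htl⟩ := hne
  have hlen : 0 < (pathsA matrix buffer).length := by rw [htl]; simp
  have hS0 : PySem.List.pyGetD ((pathsA matrix buffer).map (ptsA matrix)) ((0 : Int)) ""
      = pvCell matrix 0 0 := by
    rw [htl]
    simp only [List.map_cons, PySem.List.pyGetD_zero_cons]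
    exact pts_singleton matrix 0 0
  have hP0 : PySem.List.pyGetD (pathsA matrix buffer) ((0 : Int)) [] = [((0 : Int), (0 : Int))] := by
    rw [htl, PySem.List.pyGetD_zero_cons]
  have key := sel_eq matrix sequenceValues sequences (pathsA matrix buffer) (pathsA matrix buffer)
    0 ((0 : Int), (0 : Int)) (by simp) le_rfl
    (by show (0 : Int) < ((pathsA matrix buffer).length : Int); exact_mod_cast hlen)
  simp only [Nat.cast_zero] at key
  rw [hS0, hP0] at key
  have hfold : (pathsA matrix buffer).foldl
        (fun bst q => stepB (sequences.zip sequenceValues) (ptsA matrix q) q bst)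
        (((0 : Int), pvCell matrix 0 0, [((0 : Int), (0 : Int))]) : Int × String × List (Int × Int))
      = (List.range ((matrix.headD []).length)).foldl
          (fun bst (j : Nat) => dfsB (matrix.length * (matrix.headD []).length + 1) matrix
            matrix.length (matrix.headD []).length (sequences.zip sequenceValues) 0 (j : Int)
            (buffer - 1) (pvCell matrix 0 (j : Int)) [((0 : Int), (j : Int))] true bst)
          ((0 : Int), pvCell matrix 0 0, [((0 : Int), (0 : Int))]) := by
    rw [hpaths, List.foldl_flatMap]
    congr 1
    funext bst j
    rw [← dfs_eq, pts_singleton]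
  rw [hfold] at key
  simp only [solve, solve_alt]
  rw [← key]

-- ===== VERDICT (by name: the statement is the Claim_ definition above) =====
theorem solve_spec : Claim_equal_solve := by
  intro matrix buffer sequences sequenceValues _hdom hpre
  exact solve_eq_solve_alt matrix buffer sequences sequenceValues hpre.2.1
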